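-- pv_equiv track=rewrite | github.com/alexandershov/competitive_programming | src/competitive_programming/chapter_7.py | topological_sort_brute_force
-- ===== SOURCE A (Python) =====
-- import collections
--
-- def _get_neighbours(graph, node):
--     return graph.get(node, [])
--
-- def topological_sort_brute_force(graph) -> dict[int, set]:
--     group_by_node = {}  # node -> group
--     nodes_with_parents = set()
--     for neighbours in graph.values():
--         nodes_with_parents.update(neighbours)
--     starting_nodes = set(graph) - nodes_with_parents
--     frontier = [(node, 0) for node in starting_nodes]
--     while frontier:
--         node, node_group = frontier.pop()
--         group_by_node[node] = max(group_by_node.get(node, -1), node_group)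
--         for neighbour in _get_neighbours(graph, node):
--             frontier.append((neighbour, node_group + 1))
--     result = collections.defaultdict(set)
--     for node, group in group_by_node.items():
--         result[group].add(node)
--     return dict(result)
-- ===== SOURCE B (Python) =====
-- def topological_sort_brute_force(graph) -> dict[int, set]:
--     # Memoized depth-first search: each node is (re-)descended only when a
--     # strictly longer distance from the sources is found, instead of once per
--     # path as in the brute-force version.  Traversal is in stack (LIFO) order.
--     parents = {v for vs in graph.values() for v in vs}
--     dist = {}  # node -> longest distance from a source found so far
--
--     def visit(node, d):
--         if d > dist.get(node, -1):
--             dist[node] = d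
--             for neighbour in reversed(graph.get(node, [])):
--                 visit(neighbour, d + 1)
--
--     for node in reversed([n for n in graph if n not in parents]):
--         visit(node, 0)
--
--     result = {}
--     for node, d in dist.items():
--         result.setdefault(d, set()).add(node)
--     return result
-- ===== Notes on version B (the rewrite author's own statement) =====
-- stated objective: alternative
-- what changed: A enumerates every source-to-node path with an explicit worklist stack, re-expanding a node once per path; B is a recursive memoized depth-first search that descends into a node only when a strictly longer distance from the sources is found, so each node is re-descended at most V times instead of once per path (intended as faster; a timing run could not confirm it, so no speed is claimed).
import Mathlib
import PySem

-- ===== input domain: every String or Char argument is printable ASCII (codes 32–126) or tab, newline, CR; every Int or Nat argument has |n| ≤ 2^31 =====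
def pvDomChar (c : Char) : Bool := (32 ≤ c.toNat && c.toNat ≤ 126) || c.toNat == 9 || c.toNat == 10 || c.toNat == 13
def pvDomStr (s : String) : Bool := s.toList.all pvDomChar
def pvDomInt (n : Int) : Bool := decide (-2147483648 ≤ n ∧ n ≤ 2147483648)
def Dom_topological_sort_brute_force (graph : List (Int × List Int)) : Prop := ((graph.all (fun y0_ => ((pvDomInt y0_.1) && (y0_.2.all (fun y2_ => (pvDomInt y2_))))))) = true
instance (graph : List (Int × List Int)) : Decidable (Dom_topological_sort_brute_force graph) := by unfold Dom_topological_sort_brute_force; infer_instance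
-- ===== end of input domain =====

-- B replaces A's exhaustive worklist-stack enumeration of every source-to-node path by a
-- recursive memoized depth-first search that descends into a node only when a strictly
-- longer distance from the sources was found: a different algorithm, the same return value
-- (intended as faster, but a timing run could not confirm that, so no speed is claimed).
-- Python's `frontier.pop()`/`append` work at the END of the list; port A keeps the stack
-- REVERSED (Lean list head = Python list end = top of the stack), the same algorithm.
-- A's loop and B's recursion are given fuel (an upper bound on the iteration count /
-- recursion depth); under Pre_ (the inputs where Python A terminates) it never runs out.

-- shared adjacency helper: A's `_get_neighbours(graph, node)` = B's `graph.get(node, [])`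
def pvAdj (graph : List (Int × List Int)) (node : Int) : List Int :=
  (PySem.Dict.mk graph).getD node []

-- shared fuel bookkeeping: pvU = number of distinct nodes (bounds every path length)
def pvNodes (graph : List (Int × List Int)) : List Int :=
  PySem.List.dedup (graph.map (·.1) ++ graph.flatMap (·.2))

def pvU (graph : List (Int × List Int)) : Nat := (pvNodes graph).length

-- ===== PORT A =====
-- fuel bound for A's loop: pvWalksN graph k n = number of length-k walks starting at n;
-- pvP sums them for k ≤ pvU; pvPhi sums pvP over the stack — a strictly decreasing potential.
def pvWalksN (graph : List (Int × List Int)) : Nat → Int → Nat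
  | 0, _ => 1
  | k+1, n => ((pvAdj graph n).map (pvWalksN graph k)).sum

def pvP (graph : List (Int × List Int)) (n : Int) : Nat :=
  ((List.range (pvU graph + 1)).map (fun k => pvWalksN graph k n)).sum

def pvPhi (graph : List (Int × List Int)) (s : List (Int × Int)) : Nat :=
  (s.map (fun e => pvP graph e.1)).sum

-- the `while frontier:` loop of A: pop, max-update, push ALL neighbours (every path is walked)
def pvLoopA (graph : List (Int × List Int)) :
    Nat → List (Int × Int) → PySem.Dict Int Int → PySem.Dict Int Int
  | 0, _, d => d
  | _+1, [], d => d
  | fuel+1, (node, g) :: rest, d =>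
      pvLoopA graph fuel
        (((pvAdj graph node).map (fun c => (c, g + 1))).reverse ++ rest)
        (d.insert node (max (d.getD node (-1)) g))

def topological_sort_brute_force (graph : List (Int × List Int)) : List (Int × List Int) :=
  -- nodes_with_parents = set(); for neighbours in graph.values(): nodes_with_parents.update(neighbours)
  let nodesWithParents : PySem.Set Int :=
    ((PySem.Dict.mk graph).values).foldl (fun s neighbours => PySem.Set.update s neighbours)
      PySem.Set.empty
  -- starting_nodes = set(graph) - nodes_with_parents
  let startingNodes : PySem.Set Int :=
    PySem.Set.diff (PySem.Set.ofList ((PySem.Dict.mk graph).keys)) nodesWithParents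
  -- frontier = [(node, 0) for node in starting_nodes]  (stack kept reversed, head = top)
  let frontier : List (Int × Int) := (startingNodes.map (fun n => (n, (0 : Int)))).reverse
  let groupByNode := pvLoopA graph (pvPhi graph frontier + 1) frontier PySem.Dict.empty
  -- result = defaultdict(set); for node, group in group_by_node.items(): result[group].add(node)
  (groupByNode.items.foldl
    (fun r p => r.insert p.2 (PySem.Set.add (r.getD p.2 PySem.Set.empty) p.1))
    (PySem.Dict.empty : PySem.Dict Int (List Int))).items

-- ===== PORT B =====
-- Source B's recursive `visit(node, d)`: descend only on strict improvement, children in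
-- reversed order (LIFO).  Fuel pvU+2 bounds the recursion depth (longest path ≤ pvU).
def pvVisit (graph : List (Int × List Int)) :
    Nat → Int → Int → PySem.Dict Int Int → PySem.Dict Int Int
  | 0, _, _, dist => dist
  | f+1, node, d, dist =>
      if dist.getD node (-1) < d then
        ((pvAdj graph node).reverse).foldl
          (fun dd nb => pvVisit graph f nb (d + 1) dd) (dist.insert node d)
      else dist

def topological_sort_brute_force_alt (graph : List (Int × List Int)) : List (Int × List Int) :=
  -- parents = {v for vs in graph.values() for v in vs}
  let parents : PySem.Set Int := PySem.Set.ofList (graph.flatMap (·.2))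
  -- for node in reversed([n for n in graph if n not in parents]): visit(node, 0)
  let starts : List Int :=
    ((PySem.Dict.mk graph).keys).filter (fun n => !(PySem.Set.contains parents n))
  let dist :=
    (starts.reverse).foldl (fun dd n => pvVisit graph (pvU graph + 2) n 0 dd) PySem.Dict.empty
  -- result = {}; for node, d in dist.items(): result.setdefault(d, set()).add(node)
  (dist.items.foldl
    (fun r p => r.modify p.2 PySem.Set.empty (fun s => PySem.Set.add s p.1))
    (PySem.Dict.empty : PySem.Dict Int (List Int))).items

-- ===== PRECONDITION & SPEC =====
def pvSources (graph : List (Int × List Int)) : List Int :=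
  (graph.map (·.1)).filter (fun n => !((graph.flatMap (·.2)).contains n))

-- pvLev graph k = the nodes reachable from the sources by a walk of exactly k edges (deduplicated)
def pvLev (graph : List (Int × List Int)) : Nat → List Int
  | 0 => pvSources graph
  | k+1 => PySem.List.dedup ((pvLev graph k).flatMap (pvAdj graph))

-- Pre_ excludes (1) association lists with duplicate keys — no Python dict has them — and
-- (2) graphs with a cycle reachable from the source nodes, on which Python A never returns
-- (its frontier loop runs forever): `pvLev … (pvU … + 1) = []` says no walk of length
-- (number of nodes + 1) leaves the sources, i.e. the reachable part of the graph is acyclic,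
-- which is exactly the condition for A's loop to terminate.
def Pre_topological_sort_brute_force (graph : List (Int × List Int)) : Prop :=
  (graph.map (·.1)).Nodup ∧ pvLev graph (pvU graph + 1) = []

instance (graph : List (Int × List Int)) : Decidable (Pre_topological_sort_brute_force graph) := by
  unfold Pre_topological_sort_brute_force; infer_instance

def pvWitness_topological_sort_brute_force : (List (Int × List Int)) :=
  [(1, [2, 3]), (2, [3]), (3, [])]

def Spec_topological_sort_brute_force (graph : List (Int × List Int)) (out : List (Int × List Int)) : Prop := out = topological_sort_brute_force_alt graph
instance (graph : List (Int × List Int)) (out : List (Int × List Int)) : Decidable (Spec_topological_sort_brute_force graph out) := by unfold Spec_topological_sort_brute_force; infer_instance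

-- ===== CLAIM (what is proved, stated in full; the proofs are below) =====
def Claim_equal_topological_sort_brute_force : Prop := ∀ (graph : List (Int × List Int)), Dom_topological_sort_brute_force graph → Pre_topological_sort_brute_force graph → Spec_topological_sort_brute_force graph (topological_sort_brute_force graph)

-- ===== LEMMAS AND PROOFS =====

-- proof-side intermediate program: A's loop with B's memoized pruning added, still a stack.
-- A is proved equal to it (pvMain), and it is proved equal to B's folded recursion (pvBridge).
def pvLoopB (graph : List (Int × List Int)) :
    Nat → List (Int × Int) → PySem.Dict Int Int → PySem.Dict Int Int
  | 0, _, d => d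
  | _+1, [], d => d
  | fuel+1, (node, g) :: rest, d =>
      if g ≤ d.getD node (-1) then pvLoopB graph fuel rest d
      else
        pvLoopB graph fuel
          (((pvAdj graph node).map (fun c => (c, g + 1))).reverse ++ rest)
          (d.insert node g)

-- pvWF graph k x m : there is a walk of exactly k edges from x to m
def pvWF (graph : List (Int × List Int)) : Nat → Int → Int → Prop
  | 0, x, m => m = x
  | k+1, x, m => ∃ c ∈ pvAdj graph x, pvWF graph k c m

def pvWS (graph : List (Int × List Int)) (k : Nat) (m : Int) : Prop :=
  ∃ s ∈ pvSources graph, pvWF graph k s m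

def pvReachS (graph : List (Int × List Int)) (n : Int) : Prop := ∃ j, pvWS graph j n

def pvReach (graph : List (Int × List Int)) (x m : Int) : Prop := ∃ k, pvWF graph k x m

-- every walk from e.1 is already dominated by the recorded distances
def pvCone (graph : List (Int × List Int)) (d : PySem.Dict Int Int) (e : Int × Int) : Prop :=
  ∀ k m, pvWF graph k e.1 m → e.2 + k ≤ d.getD m (-1)

def pvGood (graph : List (Int × List Int)) (s : List (Int × Int)) : Prop :=
  ∀ e ∈ s, pvReachS graph e.1 ∧ 0 ≤ e.2

-- the order invariant: for every stack entry x, every already-visited node m reachable from x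
-- has each of its child distances either already recorded or promised by an entry ABOVE x
def pvInv (graph : List (Int × List Int)) (s : List (Int × Int)) (d : PySem.Dict Int Int) : Prop :=
  ∀ pre x post, s = pre ++ x :: post →
    ∀ m, pvReach graph x.1 m → 0 ≤ d.getD m (-1) →
      ∀ c ∈ pvAdj graph m,
        d.getD m (-1) + 1 ≤ d.getD c (-1) ∨
        ∃ p ∈ pre, p.1 = c ∧ d.getD m (-1) + 1 ≤ p.2

theorem pvWF_comp (graph : List (Int × List Int)) (a b : Nat) (x y z : Int)
    (h1 : pvWF graph a x y) (h2 : pvWF graph b y z) : pvWF graph (a + b) x z := by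
  induction a generalizing x with
  | zero =>
      have hxy : y = x := (by simpa [pvWF] using h1)
      subst hxy
      simpa using h2
  | succ a ih =>
      obtain ⟨c, hc, hw⟩ := h1
      rw [Nat.succ_add]
      exact ⟨c, hc, ih c hw⟩

theorem pvWF_decomp (graph : List (Int × List Int)) (a b : Nat) (x z : Int)
    (h : pvWF graph (a + b) x z) : ∃ y, pvWF graph a x y ∧ pvWF graph b y z := by
  induction a generalizing x with
  | zero => exact ⟨x, rfl, by simpa using h⟩
  | succ a ih =>
      rw [Nat.succ_add] at h
      obtain ⟨c, hc, hw⟩ := h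
      obtain ⟨y, h1, h2⟩ := ih c hw
      exact ⟨y, ⟨c, hc, h1⟩, h2⟩

theorem pvLev_mem (graph : List (Int × List Int)) (k : Nat) (m : Int) :
    m ∈ pvLev graph k ↔ pvWS graph k m := by
  induction k generalizing m with
  | zero => simp [pvLev, pvWS, pvWF]
  | succ k ih =>
      simp only [pvLev, PySem.List.mem_dedup, List.mem_flatMap]
      constructor
      · rintro ⟨n, hn, hm⟩
        obtain ⟨s, hs, hw⟩ := (ih n).mp hn
        refine ⟨s, hs, ?_⟩
        have := pvWF_comp graph k 1 s n m hw ⟨m, hm, rfl⟩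
        simpa using this
      · rintro ⟨s, hs, hw⟩
        have : pvWF graph (k + 1) s m := hw
        obtain ⟨y, h1, h2⟩ := pvWF_decomp graph k 1 s m this
        obtain ⟨c, hc, hcm⟩ := h2
        have hmc : m = c := hcm
        subst hmc
        exact ⟨y, (ih y).mpr ⟨s, hs, h1⟩, hc⟩

theorem pvNoLong (graph : List (Int × List Int))
    (hpre : Pre_topological_sort_brute_force graph) (k : Nat) (m : Int)
    (h : pvWS graph k m) : k ≤ pvU graph := by
  by_contra hk
  push_neg at hk
  obtain ⟨s, hs, hw⟩ := h
  have hsplit : k = (pvU graph + 1) + (k - (pvU graph + 1)) := by omega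
  rw [hsplit] at hw
  obtain ⟨y, h1, _⟩ := pvWF_decomp graph (pvU graph + 1) _ s m hw
  have : y ∈ pvLev graph (pvU graph + 1) := (pvLev_mem graph _ y).mpr ⟨s, hs, h1⟩
  rw [hpre.2] at this
  exact absurd this (List.not_mem_nil)

theorem pvWS_step (graph : List (Int × List Int)) (j : Nat) (n c : Int)
    (h : pvWS graph j n) (hc : c ∈ pvAdj graph n) : pvWS graph (j + 1) c := by
  obtain ⟨s, hs, hw⟩ := h
  exact ⟨s, hs, pvWF_comp graph j 1 s n c hw ⟨c, hc, rfl⟩⟩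

theorem pvReachS_step (graph : List (Int × List Int)) (n c : Int)
    (h : pvReachS graph n) (hc : c ∈ pvAdj graph n) : pvReachS graph c := by
  obtain ⟨j, hj⟩ := h
  exact ⟨j + 1, pvWS_step graph j n c hj hc⟩

theorem pvWBND (graph : List (Int × List Int))
    (hpre : Pre_topological_sort_brute_force graph) (n : Int) (hn : pvReachS graph n)
    (j : Nat) (v : Int) (h : pvWF graph j n v) : j ≤ pvU graph := by
  obtain ⟨i, s, hs, hw⟩ := hn
  have : pvWS graph (i + j) v := ⟨s, hs, pvWF_comp graph i j s n v hw h⟩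
  have := pvNoLong graph hpre _ v this
  omega

theorem pvNOCYCLE (graph : List (Int × List Int))
    (hpre : Pre_topological_sort_brute_force graph) (n c : Int)
    (hn : pvReachS graph n) (hc : c ∈ pvAdj graph n) : ¬ pvReach graph c n := by
  rintro ⟨k, hk⟩
  have hcyc : pvWF graph (k + 1) n n := ⟨c, hc, hk⟩
  have hiter : ∀ t : Nat, pvWF graph (t * (k + 1)) n n := by
    intro t
    induction t with
    | zero => simp [pvWF]
    | succ t ih =>
        have := pvWF_comp graph (t * (k + 1)) (k + 1) n n n ih hcyc
        simpa [Nat.succ_mul] using this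
  have := pvWBND graph hpre n hn ((pvU graph + 1) * (k + 1)) n (hiter (pvU graph + 1))
  have hge : pvU graph + 1 ≤ (pvU graph + 1) * (k + 1) := Nat.le_mul_of_pos_right _ (by omega)
  omega

theorem pvWalksN_pos (graph : List (Int × List Int)) (k : Nat) (n : Int)
    (h : pvWalksN graph k n ≠ 0) : ∃ m, pvWF graph k n m := by
  induction k generalizing n with
  | zero => exact ⟨n, rfl⟩
  | succ k ih =>
      have : ∃ c ∈ pvAdj graph n, pvWalksN graph k c ≠ 0 := by
        by_contra hall
        push_neg at hall
        apply h
        simp only [pvWalksN]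
        apply List.sum_eq_zero
        intro x hx
        obtain ⟨c, hc, rfl⟩ := List.mem_map.mp hx
        exact hall c hc
      obtain ⟨c, hc, hne⟩ := this
      obtain ⟨m, hm⟩ := ih c hne
      exact ⟨m, c, hc, hm⟩

theorem pvP_pos (graph : List (Int × List Int)) (n : Int) : 1 ≤ pvP graph n := by
  unfold pvP
  have h0 : (0 : Nat) ∈ List.range (pvU graph + 1) := by simp
  calc (1 : Nat) = pvWalksN graph 0 n := rfl
    _ ≤ _ := List.le_sum_of_mem (List.mem_map.mpr ⟨0, h0, rfl⟩)

theorem pvSumMapAdd (r : List Nat) (g h : Nat → Nat) :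
    (r.map (fun k => g k + h k)).sum = (r.map g).sum + (r.map h).sum := by
  induction r with
  | nil => rfl
  | cons a t ih => simp only [List.map_cons, List.sum_cons, ih]; omega

theorem pvSumSwap (l : List Int) (r : List Nat) (f : Nat → Int → Nat) :
    (l.map (fun c => (r.map (fun k => f k c)).sum)).sum
      = (r.map (fun k => (l.map (fun c => f k c)).sum)).sum := by
  induction l with
  | nil =>
      simp only [List.map_nil, List.sum_nil]
      induction r with
      | nil => rfl
      | cons a t ih => simp only [List.map_cons, List.sum_cons, List.map_nil, List.sum_nil] at *; omega
  | cons c t ih =>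
      simp only [List.map_cons, List.sum_cons, ih, pvSumMapAdd]

theorem pvP_step (graph : List (Int × List Int))
    (hpre : Pre_topological_sort_brute_force graph) (n : Int) (hn : pvReachS graph n) :
    pvP graph n = ((pvAdj graph n).map (pvP graph)).sum + 1 := by
  have hz : pvWalksN graph (pvU graph + 1) n = 0 := by
    by_contra h0
    obtain ⟨m, hm⟩ := pvWalksN_pos graph _ n h0
    have := pvWBND graph hpre n hn _ m hm
    omega
  have hswap : ((pvAdj graph n).map (pvP graph)).sum
      = ((List.range (pvU graph + 1)).map
          (fun k => ((pvAdj graph n).map (fun c => pvWalksN graph k c)).sum)).sum := by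
    unfold pvP
    exact pvSumSwap (pvAdj graph n) (List.range (pvU graph + 1)) (fun k c => pvWalksN graph k c)
  have hsucc : ∀ k, ((pvAdj graph n).map (fun c => pvWalksN graph k c)).sum
      = pvWalksN graph (k + 1) n := by
    intro k; rfl
  have hswap2 : ((pvAdj graph n).map (pvP graph)).sum
      = ((List.range (pvU graph + 1)).map (fun k => pvWalksN graph (k + 1) n)).sum := by
    rw [hswap]
    exact congrArg List.sum (List.map_congr_left (fun k _ => hsucc k))
  have hrhs : ((List.range (pvU graph + 1)).map (fun k => pvWalksN graph (k + 1) n)).sum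
      = ((List.range (pvU graph)).map (fun k => pvWalksN graph (k + 1) n)).sum := by
    rw [List.range_succ]
    simp [hz]
  have hlhs : pvP graph n
      = 1 + ((List.range (pvU graph)).map (fun k => pvWalksN graph (k + 1) n)).sum := by
    unfold pvP
    rw [List.range_succ_eq_map]
    simp only [List.map_cons, List.sum_cons, List.map_map]
    rfl
  rw [hswap2, hrhs, hlhs]
  omega

theorem pvPhi_append (graph : List (Int × List Int)) (a b : List (Int × Int)) :
    pvPhi graph (a ++ b) = pvPhi graph a + pvPhi graph b := by
  simp [pvPhi]

theorem pvPhi_cons (graph : List (Int × List Int)) (e : Int × Int) (t : List (Int × Int)) :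
    pvPhi graph (e :: t) = pvP graph e.1 + pvPhi graph t := by
  simp [pvPhi]

theorem pvPhi_children (graph : List (Int × List Int)) (n : Int) (g : Int) :
    pvPhi graph (((pvAdj graph n).map (fun c => (c, g + 1))).reverse)
      = ((pvAdj graph n).map (pvP graph)).sum := by
  simp only [pvPhi, List.map_reverse, List.sum_reverse, List.map_map]
  rfl

theorem pvPhi_step (graph : List (Int × List Int))
    (hpre : Pre_topological_sort_brute_force graph) (n : Int) (hn : pvReachS graph n)
    (g : Int) (t : List (Int × Int)) :
    pvPhi graph (((pvAdj graph n).map (fun c => (c, g + 1))).reverse ++ t) + 1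
      = pvPhi graph ((n, g) :: t) := by
  rw [pvPhi_append, pvPhi_children]
  have : pvPhi graph ((n, g) :: t) = pvP graph n + pvPhi graph t := by simp [pvPhi]
  rw [this, pvP_step graph hpre n hn]
  omega

theorem pvGood_tail (graph : List (Int × List Int)) (e : Int × Int) (t : List (Int × Int))
    (h : pvGood graph (e :: t)) : pvGood graph t := by
  intro e he; exact h e (List.mem_cons_of_mem _ he)

theorem pvGood_push (graph : List (Int × List Int)) (n g t)
    (h : pvGood graph ((n, g) :: t)) :
    pvGood graph (((pvAdj graph n).map (fun c => (c, g + 1))).reverse ++ t) := by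
  intro e he
  rcases List.mem_append.mp he with hl | hr
  · rw [List.mem_reverse] at hl
    obtain ⟨c, hc, rfl⟩ := List.mem_map.mp hl
    obtain ⟨hre, hge⟩ := h (n, g) (List.mem_cons_self ..)
    exact ⟨pvReachS_step graph n c hre hc, by omega⟩
  · exact h e (List.mem_cons_of_mem _ hr)

theorem pvGetSome (d : PySem.Dict Int Int) (n : Int) (h : 0 ≤ d.getD n (-1)) :
    d.get? n = some (d.getD n (-1)) := by
  rw [PySem.Dict.getD_eq_get?_getD] at *
  cases hv : d.get? n with
  | none => rw [hv] at h; norm_num at h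
  | some v => rfl

theorem pvInsGet (d : PySem.Dict Int Int) (n : Int) (v : Int)
    (hnd : d.keys.Nodup) (h : d.get? n = some v) : d.insert n v = d := by
  have hc : d.contains n = true := by
    rw [PySem.Dict.contains_eq_isSome_get?, h]; rfl
  apply PySem.Dict.ext
  rw [PySem.Dict.items_insert_of_contains _ _ hc]
  have hpt : ∀ p ∈ d.items, (if (p.1 == n) = true then (n, v) else p) = p := by
    intro p hp
    obtain ⟨p1, p2⟩ := p
    by_cases he : p1 = n
    · subst he
      have hget : d.get? p1 = some p2 := PySem.Dict.get?_of_mem_items d hp hnd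
      rw [h] at hget
      have hv2 : v = p2 := by injection hget
      simp [hv2]
    · simp [he]
  calc d.items.map (fun p => if (p.1 == n) = true then (n, v) else p)
      = d.items.map id := List.map_congr_left (fun p hp => by simpa using hpt p hp)
    _ = d.items := List.map_id _

-- the split of `C ++ t` into `pre ++ x :: post`
theorem pvSplitAppend {α : Type} (C t pre post : List α) (x : α)
    (h : C ++ t = pre ++ x :: post) :
    (∃ postC, C = pre ++ x :: postC) ∨ (∃ pre₂, pre = C ++ pre₂ ∧ t = pre₂ ++ x :: post) := by
  induction C generalizing pre with
  | nil =>
      right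
      exact ⟨pre, by simp, by simpa using h⟩
  | cons a C ih =>
      cases pre with
      | nil =>
          left
          simp only [List.cons_append, List.nil_append] at h ⊢
          have hax : a = x := by injection h
          exact ⟨C, by rw [hax]⟩
      | cons b pre' =>
          simp only [List.cons_append] at h
          have hab : a = b := by injection h
          have ht : C ++ t = pre' ++ x :: post := by injection h
          rcases ih pre' ht with ⟨postC, hC⟩ | ⟨pre₂, hp, hts⟩
          · exact Or.inl ⟨postC, by simp [hab, hC]⟩
          · exact Or.inr ⟨pre₂, by simp [hab, hp], hts⟩

theorem pvFuelA (graph : List (Int × List Int))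
    (hpre : Pre_topological_sort_brute_force graph) :
    ∀ f1 f2 s d, pvGood graph s → pvPhi graph s < f1 → pvPhi graph s < f2 →
      pvLoopA graph f1 s d = pvLoopA graph f2 s d := by
  intro f1
  induction f1 with
  | zero => intro f2 s d _ h1 _; omega
  | succ f1 ih =>
      intro f2 s d hg h1 h2
      cases f2 with
      | zero => omega
      | succ f2 =>
          cases s with
          | nil => simp [pvLoopA]
          | cons e t =>
              obtain ⟨n, g⟩ := e
              simp only [pvLoopA]
              have hn : pvReachS graph n := (hg (n, g) (List.mem_cons_self ..)).1
              have hstep := pvPhi_step graph hpre n hn g t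
              exact ih f2 _ _ (pvGood_push graph n g t hg) (by omega) (by omega)

theorem pvConeStep (graph : List (Int × List Int)) (d : PySem.Dict Int Int) (n : Int) (g : Int)
    (h : pvCone graph d (n, g)) (c : Int) (hc : c ∈ pvAdj graph n) :
    pvCone graph d (c, g + 1) := by
  intro k m hw
  have hw' : pvWF graph (k + 1) n m := ⟨c, hc, hw⟩
  have := h (k + 1) m hw'
  push_cast at this ⊢
  omega

theorem pvGhostElim (graph : List (Int × List Int))
    (hpre : Pre_topological_sort_brute_force graph) :
    ∀ f G t d, pvGood graph (G ++ t) → pvPhi graph (G ++ t) < f → d.keys.Nodup →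
      (∀ e ∈ G, pvCone graph d e ∧ 0 ≤ e.2) →
      pvLoopA graph f (G ++ t) d = pvLoopA graph (pvPhi graph t + 1) t d := by
  intro f
  induction f with
  | zero => intro G t d _ h1 _ _; omega
  | succ f ih =>
      intro G t d hg h1 hnd hG
      cases G with
      | nil =>
          simp only [List.nil_append] at hg h1 ⊢
          exact pvFuelA graph hpre _ _ t d hg h1 (by omega)
      | cons e G' =>
          obtain ⟨n, g⟩ := e
          have hcone : pvCone graph d (n, g) := (hG (n, g) (List.mem_cons_self ..)).1
          have hg0 : 0 ≤ g := (hG (n, g) (List.mem_cons_self ..)).2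
          have hdom : g ≤ d.getD n (-1) := by simpa using hcone 0 n rfl
          have hn : pvReachS graph n := (hg (n, g) (by simp)).1
          simp only [List.cons_append, pvLoopA]
          have hins : d.insert n (max (d.getD n (-1)) g) = d := by
            rw [max_eq_left hdom]
            exact pvInsGet d n _ hnd (pvGetSome d n (le_trans hg0 hdom))
          rw [hins]
          have hassoc : ((pvAdj graph n).map (fun c => (c, g + 1))).reverse ++ (G' ++ t)
              = (((pvAdj graph n).map (fun c => (c, g + 1))).reverse ++ G') ++ t := by
            rw [List.append_assoc]
          have hgood2 : pvGood graph (((pvAdj graph n).map (fun c => (c, g + 1))).reverse ++ (G' ++ t)) := by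
            apply pvGood_push graph n g (G' ++ t)
            simpa using hg
          have hphi2 : pvPhi graph (((pvAdj graph n).map (fun c => (c, g + 1))).reverse ++ (G' ++ t)) < f := by
            have := pvPhi_step graph hpre n hn g (G' ++ t)
            simp only [List.cons_append] at h1
            omega
          have hG2 : ∀ e ∈ (((pvAdj graph n).map (fun c => (c, g + 1))).reverse ++ G'),
              pvCone graph d e ∧ 0 ≤ e.2 := by
            intro e he
            rcases List.mem_append.mp he with hl | hr
            · rw [List.mem_reverse] at hl
              obtain ⟨c, hc, rfl⟩ := List.mem_map.mp hl
              exact ⟨pvConeStep graph d n g hcone c hc, by omega⟩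
            · exact hG e (List.mem_cons_of_mem _ hr)
          rw [hassoc]
          exact ih _ t d (by rw [← hassoc]; exact hgood2) (by rw [← hassoc]; exact hphi2) hnd hG2

theorem pvChainGen (graph : List (Int × List Int))
    (hpre : Pre_topological_sort_brute_force graph)
    (n : Int) (g : Int) (t : List (Int × Int)) (d : PySem.Dict Int Int)
    (hinv : pvInv graph ((n, g) :: t) d) :
    ∀ k x m, pvReach graph n x → 0 ≤ d.getD x (-1) → pvWF graph k x m →
      d.getD x (-1) + k ≤ d.getD m (-1) := by
  intro k
  induction k with
  | zero =>
      intro x m _ hx hw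
      have hmx : m = x := hw
      subst hmx
      simp
  | succ k ih =>
      intro x m hreach hx hw
      obtain ⟨c, hc, hw'⟩ := hw
      have hinv0 := hinv [] (n, g) t rfl x hreach hx c hc
      have hcd : d.getD x (-1) + 1 ≤ d.getD c (-1) := by
        rcases hinv0 with h | ⟨p, hp, _⟩
        · exact h
        · exact absurd hp (List.not_mem_nil)
      have hreach_c : pvReach graph n c := by
        obtain ⟨j, hj⟩ := hreach
        exact ⟨j + 1, pvWF_comp graph j 1 n x c hj ⟨c, hc, rfl⟩⟩
      have hxc : 0 ≤ d.getD c (-1) := by omega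
      have := ih c m hreach_c hxc hw'
      push_cast at this ⊢
      omega

theorem pvChain (graph : List (Int × List Int))
    (hpre : Pre_topological_sort_brute_force graph)
    (n : Int) (g : Int) (t : List (Int × Int)) (d : PySem.Dict Int Int)
    (hinv : pvInv graph ((n, g) :: t) d) (hg : 0 ≤ g) (hdom : g ≤ d.getD n (-1)) :
    ∀ c ∈ pvAdj graph n, pvCone graph d (c, g + 1) := by
  intro c hc
  intro k m hw
  have hrn : pvReach graph n n := ⟨0, rfl⟩
  have hn0 : 0 ≤ d.getD n (-1) := le_trans hg hdom
  have hc1 : d.getD n (-1) + 1 ≤ d.getD c (-1) := by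
    rcases hinv [] (n, g) t rfl n hrn hn0 c hc with h | ⟨p, hp, _⟩
    · exact h
    · exact absurd hp (List.not_mem_nil)
  have hrc : pvReach graph n c := ⟨1, ⟨c, hc, rfl⟩⟩
  have hchain := pvChainGen graph hpre n g t d hinv k c m hrc (by omega) hw
  push_cast at hchain ⊢
  omega

theorem pvInvTail (graph : List (Int × List Int)) (n : Int) (g : Int)
    (t : List (Int × Int)) (d : PySem.Dict Int Int)
    (hinv : pvInv graph ((n, g) :: t) d) (hdom : g ≤ d.getD n (-1)) :
    pvInv graph t d := by
  intro pre x post hsplit m hr hm c hc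
  have hsplit2 : (n, g) :: t = ((n, g) :: pre) ++ x :: post := by rw [hsplit]; rfl
  rcases hinv ((n, g) :: pre) x post hsplit2 m hr hm c hc with h | ⟨p, hp, hp1, hp2⟩
  · exact Or.inl h
  · rcases List.mem_cons.mp hp with rfl | hp'
    · left
      have hcn : n = c := hp1
      simp only at hp2
      rw [← hcn]
      omega
    · exact Or.inr ⟨p, hp', hp1, hp2⟩

theorem pvInvImp (graph : List (Int × List Int))
    (hpre : Pre_topological_sort_brute_force graph)
    (n : Int) (g : Int) (t : List (Int × Int)) (d : PySem.Dict Int Int)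
    (hgood : pvGood graph ((n, g) :: t))
    (hinv : pvInv graph ((n, g) :: t) d) (himp : d.getD n (-1) < g) :
    pvInv graph (((pvAdj graph n).map (fun c => (c, g + 1))).reverse ++ t) (d.insert n g) := by
  have hn : pvReachS graph n := (hgood (n, g) (List.mem_cons_self ..)).1
  have hg0 : 0 ≤ g := (hgood (n, g) (List.mem_cons_self ..)).2
  intro pre x post hsplit m hrx hm c hc
  rcases pvSplitAppend (((pvAdj graph n).map (fun c => (c, g + 1))).reverse) t pre post x
      hsplit with ⟨postC, hCsplit⟩ | ⟨pre₂, hpre2, ht⟩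
  · -- x is one of the freshly pushed entries (c₀, g+1)
    have hxC : x ∈ ((pvAdj graph n).map (fun c => (c, g + 1))).reverse := by
      rw [hCsplit]; simp
    rw [List.mem_reverse] at hxC
    obtain ⟨c₀, hc₀, hx0⟩ := List.mem_map.mp hxC
    have hx1 : x.1 = c₀ := by rw [← hx0]
    rw [hx1] at hrx
    have hmn : m ≠ n := by
      rintro rfl
      exact pvNOCYCLE graph hpre m c₀ hn hc₀ hrx
    have hdm : (d.insert n g).getD m (-1) = d.getD m (-1) := by
      rw [PySem.Dict.getD_insert]
      simp [hmn]
    rw [hdm] at hm ⊢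
    have hrnm : pvReach graph n m := by
      obtain ⟨k, hk⟩ := hrx
      exact ⟨k + 1, ⟨c₀, hc₀, hk⟩⟩
    rcases hinv [] (n, g) t rfl m hrnm hm c hc with h0 | ⟨p, hp, _⟩
    · left
      by_cases hcn : c = n
      · subst hcn
        simp [PySem.Dict.getD_insert]
        omega
      · rw [PySem.Dict.getD_insert]
        simp only [if_neg hcn]
        exact h0
    · exact absurd hp (List.not_mem_nil)
  · -- x is an old entry of t
    have hsplit2 : (n, g) :: t = ((n, g) :: pre₂) ++ x :: post := by rw [ht]; rfl
    by_cases hmn : m = n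
    · subst hmn
      right
      refine ⟨(c, g + 1), ?_, rfl, ?_⟩
      · rw [hpre2]
        apply List.mem_append_left
        rw [List.mem_reverse]
        exact List.mem_map.mpr ⟨c, hc, rfl⟩
      · simp [PySem.Dict.getD_insert]
    · have hdm : (d.insert n g).getD m (-1) = d.getD m (-1) := by
        rw [PySem.Dict.getD_insert]; simp [hmn]
      rw [hdm] at hm ⊢
      rcases hinv ((n, g) :: pre₂) x post hsplit2 m hrx hm c hc with h0 | ⟨p, hp, hp1, hp2⟩
      · left
        by_cases hcn : c = n
        · subst hcn
          simp [PySem.Dict.getD_insert]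
          omega
        · rw [PySem.Dict.getD_insert]
          simp only [if_neg hcn]
          exact h0
      · rcases List.mem_cons.mp hp with rfl | hp'
        · left
          have hcn : n = c := hp1
          simp only at hp2
          subst hcn
          simp [PySem.Dict.getD_insert]
          omega
        · right
          exact ⟨p, by rw [hpre2]; exact List.mem_append_right _ hp', hp1, hp2⟩

theorem pvMain (graph : List (Int × List Int))
    (hpre : Pre_topological_sort_brute_force graph) :
    ∀ f s d, pvGood graph s → pvPhi graph s < f → d.keys.Nodup → pvInv graph s d →
      pvLoopA graph f s d = pvLoopB graph f s d := by
  intro f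
  induction f with
  | zero => intro s d _ h1 _ _; omega
  | succ f ih =>
      intro s d hg h1 hnd hinv
      cases s with
      | nil => simp [pvLoopA, pvLoopB]
      | cons e t =>
          obtain ⟨n, g⟩ := e
          have hn : pvReachS graph n := (hg (n, g) (List.mem_cons_self ..)).1
          have hg0 : 0 ≤ g := (hg (n, g) (List.mem_cons_self ..)).2
          have hP := pvP_pos graph n
          have hcons := pvPhi_cons graph (n, g) t
          simp only at hcons
          simp only [pvLoopA, pvLoopB]
          by_cases hdom : g ≤ d.getD n (-1)
          · rw [if_pos hdom]
            have hins : d.insert n (max (d.getD n (-1)) g) = d := by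
              rw [max_eq_left hdom]
              exact pvInsGet d n _ hnd (pvGetSome d n (le_trans hg0 hdom))
            rw [hins]
            have hcone : ∀ e ∈ ((pvAdj graph n).map (fun c => (c, g + 1))).reverse,
                pvCone graph d e ∧ 0 ≤ e.2 := by
              intro e he
              rw [List.mem_reverse] at he
              obtain ⟨c, hc, rfl⟩ := List.mem_map.mp he
              exact ⟨pvChain graph hpre n g t d hinv hg0 hdom c hc, by omega⟩
            have hstep := pvPhi_step graph hpre n hn g t
            have h2 := pvGhostElim graph hpre f
              (((pvAdj graph n).map (fun c => (c, g + 1))).reverse) t d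
              (pvGood_push graph n g t hg) (by omega) hnd hcone
            rw [h2]
            have h3 := pvFuelA graph hpre (pvPhi graph t + 1) f t d
              (pvGood_tail graph _ _ hg) (by omega) (by omega)
            rw [h3]
            exact ih t d (pvGood_tail graph _ _ hg) (by omega) hnd
              (pvInvTail graph n g t d hinv hdom)
          · rw [if_neg hdom]
            have hmax : max (d.getD n (-1)) g = g := max_eq_right (le_of_lt (not_le.mp hdom))
            rw [hmax]
            have hstep := pvPhi_step graph hpre n hn g t
            exact ih _ _ (pvGood_push graph n g t hg) (by omega)
              (PySem.Dict.nodup_keys_insert d n g hnd)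
              (pvInvImp graph hpre n g t d hg hinv (not_le.mp hdom))

-- ===== bridge: the memoized stack loop = B's folded recursion =====

theorem pvFoldlCongr {α β : Type} (l : List α) (f g : β → α → β) (b : β)
    (h : ∀ x ∈ l, ∀ acc, f acc x = g acc x) : l.foldl f b = l.foldl g b := by
  induction l generalizing b with
  | nil => rfl
  | cons a t ih =>
      simp only [List.foldl_cons]
      rw [h a (List.mem_cons_self ..) b]
      exact ih _ (fun x hx acc => h x (List.mem_cons_of_mem _ hx) acc)

-- fuel irrelevance for pvVisit: any fuel strictly above every walk length from the node
theorem pvVisitFuel (graph : List (Int × List Int)) :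
    ∀ f1 f2 n g d, (∀ k m, pvWF graph k n m → k < f1) → (∀ k m, pvWF graph k n m → k < f2) →
      pvVisit graph f1 n g d = pvVisit graph f2 n g d := by
  intro f1
  induction f1 with
  | zero => intro f2 n g d h1 _; exact absurd (h1 0 n rfl) (by omega)
  | succ f1 ih =>
      intro f2 n g d h1 h2
      cases f2 with
      | zero => exact absurd (h2 0 n rfl) (by omega)
      | succ f2 =>
          simp only [pvVisit]
          by_cases hlt : d.getD n (-1) < g
          · rw [if_pos hlt, if_pos hlt]
            apply pvFoldlCongr
            intro c hc acc
            rw [List.mem_reverse] at hc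
            refine ih f2 c (g + 1) acc ?_ ?_
            · intro k m hw
              have := h1 (k + 1) m ⟨c, hc, hw⟩
              omega
            · intro k m hw
              have := h2 (k + 1) m ⟨c, hc, hw⟩
              omega
          · rw [if_neg hlt, if_neg hlt]

-- fuel irrelevance for the memoized stack loop
theorem pvFuelB (graph : List (Int × List Int))
    (hpre : Pre_topological_sort_brute_force graph) :
    ∀ f1 f2 s d, pvGood graph s → pvPhi graph s < f1 → pvPhi graph s < f2 →
      pvLoopB graph f1 s d = pvLoopB graph f2 s d := by
  intro f1
  induction f1 with
  | zero => intro f2 s d _ h1 _; omega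
  | succ f1 ih =>
      intro f2 s d hg h1 h2
      cases f2 with
      | zero => omega
      | succ f2 =>
          cases s with
          | nil => simp [pvLoopB]
          | cons e t =>
              obtain ⟨n, g⟩ := e
              have hn : pvReachS graph n := (hg (n, g) (List.mem_cons_self ..)).1
              have hP := pvP_pos graph n
              have hcons := pvPhi_cons graph (n, g) t
              simp only at hcons
              simp only [pvLoopB]
              by_cases hdom : g ≤ d.getD n (-1)
              · rw [if_pos hdom, if_pos hdom]
                exact ih f2 t d (pvGood_tail graph _ _ hg) (by omega) (by omega)
              · rw [if_neg hdom, if_neg hdom]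
                have hstep := pvPhi_step graph hpre n hn g t
                exact ih f2 _ _ (pvGood_push graph n g t hg) (by omega) (by omega)

-- walks from a source-reachable node are bounded by pvU, so fuel pvU+2 is always enough
theorem pvVisitBound (graph : List (Int × List Int))
    (hpre : Pre_topological_sort_brute_force graph) (n : Int) (hn : pvReachS graph n)
    (f : Nat) (hf : pvU graph < f) : ∀ k m, pvWF graph k n m → k < f := by
  intro k m hw
  have := pvWBND graph hpre n hn k m hw
  omega

-- the bridge: running the memoized stack on `es ++ rest` = folding Source B's visit over es
theorem pvBridge (graph : List (Int × List Int))
    (hpre : Pre_topological_sort_brute_force graph) :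
    ∀ f es rest d, pvGood graph (es ++ rest) → pvPhi graph (es ++ rest) < f →
      pvLoopB graph f (es ++ rest) d
        = pvLoopB graph (pvPhi graph rest + 1) rest
            (es.foldl (fun dd e => pvVisit graph (pvU graph + 2) e.1 e.2 dd) d) := by
  intro f
  induction f with
  | zero => intro es rest d _ h1; omega
  | succ f ih =>
      intro es rest d hg h1
      cases es with
      | nil =>
          simp only [List.nil_append, List.foldl_nil] at *
          exact pvFuelB graph hpre (f + 1) (pvPhi graph rest + 1) rest d hg h1 (by omega)
      | cons e es' =>
          obtain ⟨n, g⟩ := e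
          have hn : pvReachS graph n :=
            (hg (n, g) (by simp)).1
          have hP := pvP_pos graph n
          have hphi : pvPhi graph (((n, g) :: es') ++ rest)
              = pvP graph n + pvPhi graph (es' ++ rest) := by
            simp [pvPhi]
          simp only [List.cons_append, pvLoopB, List.foldl_cons]
          by_cases hdom : g ≤ d.getD n (-1)
          · rw [if_pos hdom]
            have hvis : pvVisit graph (pvU graph + 2) n g d = d := by
              simp only [pvVisit]
              rw [if_neg (by omega)]
            rw [hvis]
            exact ih es' rest d (pvGood_tail graph _ _ hg) (by omega)
          · rw [if_neg hdom]
            have hvis : pvVisit graph (pvU graph + 2) n g d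
                = ((pvAdj graph n).reverse).foldl
                    (fun dd nb => pvVisit graph (pvU graph + 1) nb (g + 1) dd)
                    (d.insert n g) := by
              simp only [pvVisit]
              rw [if_pos (by omega)]
            have hassoc : ((pvAdj graph n).map (fun c => (c, g + 1))).reverse ++ (es' ++ rest)
                = (((pvAdj graph n).map (fun c => (c, g + 1))).reverse ++ es') ++ rest := by
              rw [List.append_assoc]
            have hgood2 : pvGood graph
                (((pvAdj graph n).map (fun c => (c, g + 1))).reverse ++ (es' ++ rest)) :=
              pvGood_push graph n g (es' ++ rest) (by simpa using hg)
            have hstep := pvPhi_step graph hpre n hn g (es' ++ rest)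
            have hc2 := pvPhi_cons graph (n, g) (es' ++ rest)
            simp only at hc2
            rw [hassoc] at hgood2
            have hphi2 : pvPhi graph
                ((((pvAdj graph n).map (fun c => (c, g + 1))).reverse ++ es') ++ rest) < f := by
              rw [← hassoc]
              omega
            rw [hassoc]
            rw [ih _ rest (d.insert n g) hgood2 hphi2]
            congr 1
            rw [List.foldl_append]
            congr 1
            -- fold of visit over the freshly pushed children = the recursive call in pvVisit
            have hmapped : ((pvAdj graph n).map (fun c => (c, g + 1))).reverse
                = ((pvAdj graph n).reverse).map (fun c => (c, g + 1)) := by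
              rw [List.map_reverse]
            rw [hvis, hmapped, List.foldl_map]
            apply pvFoldlCongr
            intro c hc acc
            rw [List.mem_reverse] at hc
            exact pvVisitFuel graph (pvU graph + 2) (pvU graph + 1) c (g + 1) acc
              (pvVisitBound graph hpre c (pvReachS_step graph n c hn hc) _ (by omega))
              (pvVisitBound graph hpre c (pvReachS_step graph n c hn hc) _ (by omega))

theorem pvFoldUpdate (ls : List (List Int)) (s : PySem.Set Int) :
    ls.foldl (fun s l => PySem.Set.update s l) s = ls.flatten.foldl PySem.Set.add s := by
  induction ls generalizing s with
  | nil => rfl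
  | cons a t ih => simp only [List.foldl_cons, List.flatten_cons, List.foldl_append, ih]; rfl

theorem pvFoldAddNodup (xs : List Int) : ∀ acc : List Int, (acc ++ xs).Nodup →
    xs.foldl PySem.Set.add acc = acc ++ xs := by
  induction xs with
  | nil => intro acc _; simp
  | cons x t ih =>
      intro acc hnd
      have hx : x ∉ acc := by
        intro hmem
        exact List.disjoint_of_nodup_append hnd hmem List.mem_cons_self
      have hadd : PySem.Set.add acc x = acc ++ [x] := by
        simp [PySem.Set.add, PySem.Set.contains, hx]
      simp only [List.foldl_cons, hadd]
      have hnd2 : ((acc ++ [x]) ++ t).Nodup := by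
        simpa [List.append_assoc] using hnd
      rw [ih (acc ++ [x]) hnd2]
      simp

theorem pvOfListNodup (xs : List Int) (h : xs.Nodup) : PySem.Set.ofList xs = xs := by
  have := pvFoldAddNodup xs [] (by simpa using h)
  simpa [PySem.Set.ofList] using this

theorem pvContainsOfList (L : List Int) (n : Int) :
    PySem.Set.contains (PySem.Set.ofList L) n = L.contains n := by
  have hmem : n ∈ PySem.Set.ofList L ↔ n ∈ L := PySem.Set.mem_ofList ..
  by_cases h : n ∈ L <;> simp [PySem.Set.contains, hmem, h]

theorem pvInitEq (graph : List (Int × List Int))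
    (hnd : (graph.map (·.1)).Nodup) :
    (PySem.Set.diff (PySem.Set.ofList ((PySem.Dict.mk graph).keys))
        (((PySem.Dict.mk graph).values).foldl
          (fun s neighbours => PySem.Set.update s neighbours) PySem.Set.empty))
      = ((PySem.Dict.mk graph).keys).filter
          (fun n => !(PySem.Set.contains (PySem.Set.ofList (graph.flatMap (·.2))) n)) := by
  have hvals : (PySem.Dict.mk graph).values = graph.map (·.2) := rfl
  have hparents : ((PySem.Dict.mk graph).values).foldl
      (fun s neighbours => PySem.Set.update s neighbours) PySem.Set.empty
      = PySem.Set.ofList (graph.flatMap (·.2)) := by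
    rw [hvals, pvFoldUpdate]
    have hfl : (graph.map (·.2)).flatten = graph.flatMap (·.2) := by
      simp [List.flatMap_def]
    rw [hfl]
    rfl
  rw [hparents]
  have hkeys : (PySem.Dict.mk graph).keys = graph.map (·.1) := rfl
  have hof : PySem.Set.ofList ((PySem.Dict.mk graph).keys) = (PySem.Dict.mk graph).keys := by
    rw [hkeys]
    exact pvOfListNodup _ hnd
  show PySem.Set.diff (PySem.Set.ofList ((PySem.Dict.mk graph).keys)) _ = _
  rw [hof]
  rfl

theorem pvInitSources (graph : List (Int × List Int))
    (hnd : (graph.map (·.1)).Nodup) :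
    ((PySem.Dict.mk graph).keys).filter
        (fun n => !(PySem.Set.contains (PySem.Set.ofList (graph.flatMap (·.2))) n))
      = pvSources graph := by
  have hkeys : (PySem.Dict.mk graph).keys = graph.map (·.1) := rfl
  rw [hkeys]
  unfold pvSources
  apply List.filter_congr
  intro n _
  rw [pvContainsOfList]

-- ===== VERDICT (by name: the statement is the Claim_ definition above) =====
theorem topological_sort_brute_force_spec : Claim_equal_topological_sort_brute_force := by
  intro graph _ hpre
  unfold Spec_topological_sort_brute_force topological_sort_brute_force topological_sort_brute_force_alt
  dsimp only
  rw [pvInitEq graph hpre.1, pvInitSources graph hpre.1]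
  have hgood : pvGood graph (((pvSources graph).map (fun n => (n, (0 : Int)))).reverse) := by
    intro e he
    rw [List.mem_reverse] at he
    obtain ⟨s, hs, rfl⟩ := List.mem_map.mp he
    exact ⟨⟨0, s, hs, rfl⟩, le_refl 0⟩
  have hinv : pvInv graph (((pvSources graph).map (fun n => (n, (0 : Int)))).reverse)
      PySem.Dict.empty := by
    intro pre x post hsplit m hr hm c hc
    rw [PySem.Dict.getD_empty] at hm
    exact absurd hm (by norm_num)
  have hmain := pvMain graph hpre
    (pvPhi graph (((pvSources graph).map (fun n => (n, (0 : Int)))).reverse) + 1)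
    (((pvSources graph).map (fun n => (n, (0 : Int)))).reverse)
    PySem.Dict.empty hgood (by omega) PySem.Dict.nodup_keys_empty hinv
  rw [hmain]
  have hbridge := pvBridge graph hpre
    (pvPhi graph (((pvSources graph).map (fun n => (n, (0 : Int)))).reverse) + 1)
    (((pvSources graph).map (fun n => (n, (0 : Int)))).reverse) [] PySem.Dict.empty
    (by simpa using hgood) (by simpa using (by omega : pvPhi graph (((pvSources graph).map (fun n => (n, (0 : Int)))).reverse) < pvPhi graph (((pvSources graph).map (fun n => (n, (0 : Int)))).reverse) + 1))
  simp only [List.append_nil] at hbridge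
  rw [hbridge]
  have hfold : (((pvSources graph).map (fun n => (n, (0 : Int)))).reverse).foldl
      (fun dd e => pvVisit graph (pvU graph + 2) e.1 e.2 dd) PySem.Dict.empty
      = ((pvSources graph).reverse).foldl
          (fun dd n => pvVisit graph (pvU graph + 2) n 0 dd) PySem.Dict.empty := by
    rw [← List.map_reverse, List.foldl_map]
  rw [hfold]
  rfl
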